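-- pv_equiv track=rewrite | github.com/natedonato/leetcode | solutions/3250-maximum-square-area-by-removing-fences-from-a-field/solution.py | maximizeSquareArea
-- ===== SOURCE A (Python) =====
-- from typing import List
--
-- def maximizeSquareArea(m: int, n: int, hFences: List[int], vFences: List[int]) -> int:
--     max_size = -1
--     hSizes = set()
--     hFences.extend([1, m])
--     vFences.extend([1, n])
--
--     for i in range(len(hFences) - 1):
--         for j in range(i+1, len(hFences)):
--             diff = abs(hFences[i] - hFences[j])
--             hSizes.add(diff)
--
--     for i in range(len(vFences) - 1):
--         for j in range(i+1, len(vFences)):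
--             diff = abs(vFences[i] - vFences[j])
--             if diff in hSizes:
--                 max_size = max(max_size, diff)
--
--     return -1 if max_size == -1 else max_size ** 2 % (10**9 + 7)
-- ===== SOURCE B (Python) =====
-- from typing import List
--
-- MOD = 10 ** 9 + 7
--
-- def _gapsDesc(fences):
--     # distinct pairwise absolute gaps, collected by walking suffixes,
--     # then sorted in descending order
--     s = set()
--     tail = fences
--     while tail:
--         head, tail = tail[0], tail[1:]
--         s.update(abs(head - y) for y in tail)
--     return sorted(s, reverse=True)
--
-- def maximizeSquareArea(m: int, n: int, hFences: List[int], vFences: List[int]) -> int: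
--     hFences.extend([1, m])
--     vFences.extend([1, n])
--     hG = _gapsDesc(hFences)
--     vG = _gapsDesc(vFences)
--     # two-pointer merge of the two descending lists: the first common
--     # element met is the largest common gap
--     i = j = 0
--     while i < len(hG) and j < len(vG):
--         if hG[i] == vG[j]:
--             return hG[i] ** 2 % MOD
--         if hG[i] > vG[j]:
--             i += 1
--         else:
--             j += 1
--     return -1
-- ===== Notes on version B (the rewrite author's own statement) =====
-- stated objective: alternative
-- what changed: B replaces A's hash-set membership tests streaming a running maximum by sorting the two distinct-gap lists in descending order and finding the largest common gap with a two-pointer merge that returns at the first match.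
import Mathlib
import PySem

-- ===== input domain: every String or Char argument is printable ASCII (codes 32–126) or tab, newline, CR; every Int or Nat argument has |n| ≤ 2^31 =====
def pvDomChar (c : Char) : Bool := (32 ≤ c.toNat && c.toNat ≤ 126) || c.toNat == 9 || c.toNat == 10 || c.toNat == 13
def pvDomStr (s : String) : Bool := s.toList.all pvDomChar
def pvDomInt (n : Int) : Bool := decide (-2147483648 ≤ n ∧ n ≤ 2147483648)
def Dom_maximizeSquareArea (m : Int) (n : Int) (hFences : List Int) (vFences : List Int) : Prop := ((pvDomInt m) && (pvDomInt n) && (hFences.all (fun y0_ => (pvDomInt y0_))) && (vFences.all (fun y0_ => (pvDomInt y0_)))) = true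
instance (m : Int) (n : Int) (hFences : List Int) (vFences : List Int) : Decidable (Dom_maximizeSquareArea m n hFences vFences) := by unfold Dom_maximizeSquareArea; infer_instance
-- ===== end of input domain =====

-- B sorts the two distinct-gap lists descending and finds the largest common gap by a
-- two-pointer merge, instead of A's hash-set membership tests streaming a running maximum
-- (objective: alternative).
-- Both versions mutate hFences/vFences in place by the same extend(); the equivalence proved is about the return value.

-- ===== PORT A =====
def maximizeSquareArea (m : Int) (n : Int) (hFences : List Int) (vFences : List Int) : Int :=
  -- hFences.extend([1, m]); vFences.extend([1, n])
  let hF := hFences ++ [1, m]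
  let vF := vFences ++ [1, n]
  -- nested index loops filling the set hSizes
  let hSizes : PySem.Set Int :=
    (PySem.List.pyRange 0 (PySem.List.len hF - 1) 1).foldl (fun s i =>
      (PySem.List.pyRange (i + 1) (PySem.List.len hF) 1).foldl (fun s j =>
        PySem.Set.add s (|PySem.List.pyGetD hF i 0 - PySem.List.pyGetD hF j 0|)) s) []
  -- nested index loops streaming max_size
  let maxSize : Int :=
    (PySem.List.pyRange 0 (PySem.List.len vF - 1) 1).foldl (fun ms i =>
      (PySem.List.pyRange (i + 1) (PySem.List.len vF) 1).foldl (fun ms j =>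
        let diff := |PySem.List.pyGetD vF i 0 - PySem.List.pyGetD vF j 0|
        if PySem.Set.contains hSizes diff then max ms diff else ms) ms) (-1)
  if maxSize = -1 then -1 else PySem.Int.mod (maxSize ^ 2) (10 ^ 9 + 7)

-- ===== PORT B =====
-- while tail: head, tail = tail[0], tail[1:]; s.update(abs(head - y) for y in tail)
def pvGapSet : PySem.Set Int → List Int → PySem.Set Int
  | s, [] => s
  | s, head :: tail => pvGapSet (PySem.Set.update s (tail.map fun y => |head - y|)) tail

-- the two-pointer while loop: advances into whichever descending list has the larger head,
-- returning hG[i] ** 2 % (10**9 + 7) at the first common element, -1 if a list runs out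
def pvMerge : List Int → List Int → Int
  | [], _ => -1
  | _ :: _, [] => -1
  | a :: as, b :: bs =>
    if a = b then PySem.Int.mod (a ^ 2) (10 ^ 9 + 7)
    else if a > b then pvMerge as (b :: bs)
    else pvMerge (a :: as) bs
termination_by l1 l2 => l1.length + l2.length

def maximizeSquareArea_alt (m : Int) (n : Int) (hFences : List Int) (vFences : List Int) : Int :=
  let hF := hFences ++ [1, m]
  let vF := vFences ++ [1, n]
  -- _gapsDesc: sorted(s, reverse=True)
  let hG := PySem.List.sorted (pvGapSet [] hF) (fun x => x) true
  let vG := PySem.List.sorted (pvGapSet [] vF) (fun x => x) true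
  pvMerge hG vG

-- ===== PRECONDITION & SPEC =====
def Spec_maximizeSquareArea (m : Int) (n : Int) (hFences : List Int) (vFences : List Int) (out : Int) : Prop := out = maximizeSquareArea_alt m n hFences vFences
instance (m : Int) (n : Int) (hFences : List Int) (vFences : List Int) (out : Int) : Decidable (Spec_maximizeSquareArea m n hFences vFences out) := by unfold Spec_maximizeSquareArea; infer_instance

-- ===== CLAIM (what is proved, stated in full; the proofs are below) =====
def Claim_equal_maximizeSquareArea : Prop := ∀ (m : Int) (n : Int) (hFences : List Int) (vFences : List Int), Dom_maximizeSquareArea m n hFences vFences → Spec_maximizeSquareArea m n hFences vFences (maximizeSquareArea m n hFences vFences)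

-- ===== LEMMAS AND PROOFS =====

-- the ordered list of index pairs (i < j) as element pairs, and their absolute differences
def pvPairs : List Int → List (Int × Int)
  | [] => []
  | x :: t => (t.map fun y => (x, y)) ++ pvPairs t

def pvDiffs (l : List Int) : List Int := (pvPairs l).map fun p => |p.1 - p.2|

theorem pvDiffs_cons (x : Int) (t : List Int) :
    pvDiffs (x :: t) = (t.map fun y => |x - y|) ++ pvDiffs t := by
  simp [pvDiffs, pvPairs, Function.comp]

-- nat-index double loop = fold over pvPairs
theorem pv_range_pairs {β : Type} (f : β → Int → Int → β) :
    ∀ (l : List Int) (s0 : β),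
      (List.range (l.length - 1)).foldl
        (fun s k => (l.drop (k + 1)).foldl (fun s y => f s (l.getD k 0) y) s) s0
      = (pvPairs l).foldl (fun s p => f s p.1 p.2) s0 := by
  intro l
  induction l with
  | nil => intro s0; rfl
  | cons x t ih =>
      intro s0
      cases t with
      | nil => rfl
      | cons z t' =>
          simp only [List.length_cons, Nat.add_sub_cancel, List.range_succ_eq_map,
            List.foldl_cons, List.foldl_map]
          simp only [List.length_cons, Nat.add_sub_cancel] at ih
          simp only [Nat.succ_eq_add_one, List.getD_cons_succ, List.drop_succ_cons,
            Nat.zero_add, List.getD_cons_zero]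
          rw [pvPairs, List.foldl_append, List.foldl_map]
          exact ih _

-- pyRange/pyGetD double loop = fold over pvPairs
theorem pv_pyloop_pairs {β : Type} (f : β → Int → Int → β) (l : List Int) (s0 : β) :
    (PySem.List.pyRange 0 (PySem.List.len l - 1) 1).foldl (fun s i =>
      (PySem.List.pyRange (i + 1) (PySem.List.len l) 1).foldl (fun s j =>
        f s (PySem.List.pyGetD l i 0) (PySem.List.pyGetD l j 0)) s) s0
    = (pvPairs l).foldl (fun s p => f s p.1 p.2) s0 := by
  rw [PySem.List.pyRange_one, List.foldl_map]
  rw [show (PySem.List.len l - 1 - 0).toNat = l.length - 1 by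
    simp [PySem.List.len_eq]]
  rw [← pv_range_pairs f l s0]
  apply List.foldl_ext
  intro s k hk
  rw [show (0:Int) + (k:Int) + 1 = ((k+1 : Nat) : Int) by push_cast; ring]
  rw [PySem.List.foldl_pyRange_pyGetD l 0 _ s (by positivity)]
  simp [PySem.List.pyGetD_natCast]

theorem pv_filter_fold (c : Int → Bool) :
    ∀ (ds : List Int) (a : Int),
      ds.foldl (fun a d => if c d then max a d else a) a
      = (ds.filter c).foldl max a := by
  intro ds
  induction ds with
  | nil => intro a; rfl
  | cons d t ih =>
      intro a
      by_cases h : c d = true <;> simp [h, ih]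

theorem pv_mem_update (s : PySem.Set Int) (xs : List Int) (d : Int) :
    d ∈ PySem.Set.update s xs ↔ d ∈ s ∨ d ∈ xs := by
  induction xs generalizing s with
  | nil => simp [PySem.Set.update]
  | cons x t ih =>
      simp only [PySem.Set.update, List.foldl_cons] at *
      rw [ih]
      simp [PySem.Set.mem_add]
      tauto

theorem pv_mem_gapSet : ∀ (l : List Int) (s : PySem.Set Int) (d : Int),
    d ∈ pvGapSet s l ↔ d ∈ s ∨ d ∈ pvDiffs l := by
  intro l
  induction l with
  | nil => simp [pvGapSet, pvDiffs, pvPairs]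
  | cons x t ih =>
      intro s d
      rw [pvGapSet, ih, pv_mem_update, pvDiffs_cons]
      simp only [List.mem_append, List.mem_map]
      exact or_assoc

theorem pv_nodup_gapSet : ∀ (l : List Int) (s : PySem.Set Int), s.Nodup → (pvGapSet s l).Nodup := by
  intro l
  induction l with
  | nil => intro s h; exact h
  | cons x t ih => intro s h; exact ih _ (PySem.Set.nodup_update _ _ h)

theorem pv_diffs_nonneg (l : List Int) (d : Int) (h : d ∈ pvDiffs l) : 0 ≤ d := by
  simp only [pvDiffs, List.mem_map] at h
  obtain ⟨p, -, rfl⟩ := h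
  exact abs_nonneg _

-- sorted(s, reverse=True) of a duplicate-free list is strictly descending
theorem pv_sorted_gt (l : List Int) (hn : l.Nodup) :
    (PySem.List.sorted l (fun x => x) true).Pairwise (· > ·) := by
  have hp := PySem.List.sorted_pairwise_rev (xs := l) (key := fun x => x)
  have hnd : (PySem.List.sorted l (fun x => x) true).Nodup :=
    (PySem.List.sorted_perm l (fun x => x) true).nodup_iff.mpr hn
  exact (hp.and hnd).imp (fun h => lt_of_le_of_ne h.1 (Ne.symm h.2))

-- in a strictly descending list the head bounds every element
theorem pv_head_ge (x : Int) (t : List Int) (h : (x :: t).Pairwise (· > ·)) :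
    ∀ y ∈ x :: t, y ≤ x := by
  intro y hy
  rcases List.mem_cons.mp hy with rfl | hy
  · exact le_refl _
  · exact le_of_lt ((List.pairwise_cons.mp h).1 y hy)

-- the two-pointer merge on strictly descending lists finds the first (= largest) common element
theorem pvMerge_eq : ∀ (l1 l2 : List Int), l1.Pairwise (· > ·) → l2.Pairwise (· > ·) →
    pvMerge l1 l2 = (match l1.filter (fun x => l2.contains x) with
      | [] => -1
      | x :: _ => PySem.Int.mod (x ^ 2) (10 ^ 9 + 7)) := by
  intro l1 l2 h1 h2
  induction l1, l2 using pvMerge.induct with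
  | case1 l2 => simp [pvMerge]
  | case2 a as => simp [pvMerge]
  | case3 as b bs =>
      simp [pvMerge]
  | case4 a as b bs hne hgt ih =>
      have hanb : a ∉ bs := fun hm =>
        absurd (pv_head_ge b bs h2 a (List.mem_cons_of_mem _ hm)) (by omega)
      rw [pvMerge, if_neg hne, if_pos hgt,
        List.filter_cons_of_neg (by simp; exact ⟨hne, hanb⟩)]
      exact ih (List.Pairwise.of_cons h1) h2
  | case5 a as b bs hne hngt ih =>
      have hsame : (a :: as).filter (fun x => (b :: bs).contains x)
          = (a :: as).filter (fun x => bs.contains x) := by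
        apply List.filter_congr
        intro y hy
        have hyb : y ≠ b := by
          have := pv_head_ge a as h1 y hy
          omega
        simp [hyb]
      rw [pvMerge, if_neg hne, if_neg hngt, hsame]
      exact ih h1 (List.Pairwise.of_cons h2)

theorem pv_main (m n : Int) (hF vF : List Int) :
    maximizeSquareArea m n hF vF = maximizeSquareArea_alt m n hF vF := by
  unfold maximizeSquareArea maximizeSquareArea_alt
  set hF2 := hF ++ [1, m] with hh
  set vF2 := vF ++ [1, n] with hv
  simp only
  rw [pv_pyloop_pairs (fun s a b => PySem.Set.add s |a - b|) hF2 []]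
  rw [show (pvPairs hF2).foldl (fun s p => PySem.Set.add s |p.1 - p.2|) [] =
        PySem.Set.ofList (pvDiffs hF2) by
    rw [PySem.Set.ofList_eq_foldl, pvDiffs, List.foldl_map]]
  set hS := PySem.Set.ofList (pvDiffs hF2) with hsdef
  rw [pv_pyloop_pairs (fun ms a b =>
        if PySem.Set.contains hS |a - b| then max ms |a - b| else ms) vF2 (-1)]
  rw [show (pvPairs vF2).foldl (fun ms p =>
        if PySem.Set.contains hS |p.1 - p.2| then max ms |p.1 - p.2| else ms) (-1) =
        (pvDiffs vF2).foldl (fun ms d =>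
          if PySem.Set.contains hS d then max ms d else ms) (-1) by
    rw [pvDiffs, List.foldl_map]]
  rw [pv_filter_fold]
  set hG := PySem.List.sorted (pvGapSet [] hF2) (fun x => x) true with hGdef
  set vG := PySem.List.sorted (pvGapSet [] vF2) (fun x => x) true with vGdef
  have hGgt : hG.Pairwise (· > ·) := pv_sorted_gt _ (pv_nodup_gapSet hF2 [] List.nodup_nil)
  have vGgt : vG.Pairwise (· > ·) := pv_sorted_gt _ (pv_nodup_gapSet vF2 [] List.nodup_nil)
  rw [pvMerge_eq hG vG hGgt vGgt]
  set c := hG.filter (fun x => vG.contains x) with cdef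
  set Af := (pvDiffs vF2).filter (fun d => PySem.Set.contains hS d) with afdef
  have hmem : ∀ d : Int, d ∈ Af ↔ d ∈ c := by
    intro d
    rw [afdef, cdef, List.mem_filter, List.mem_filter]
    simp only [hGdef, vGdef, PySem.List.mem_sorted, pv_mem_gapSet, hsdef,
      PySem.Set.contains_iff, PySem.Set.mem_ofList, List.contains_iff_mem,
      List.not_mem_nil, false_or]
    tauto
  cases hc : c with
  | nil =>
      have hAf : Af = [] := by
        rw [List.eq_nil_iff_forall_not_mem]
        intro d hd
        have := (hmem d).mp hd
        rw [hc] at this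
        exact (List.not_mem_nil).elim this
      rw [hAf]
      simp
  | cons x t =>
      have hx : x ∈ Af := (hmem x).mpr (hc ▸ List.mem_cons_self)
      have hx0 : 0 ≤ x := pv_diffs_nonneg vF2 x (List.mem_filter.mp hx).1
      have hcp : (x :: t).Pairwise (· > ·) := by
        rw [← hc, cdef]
        exact hGgt.sublist List.filter_sublist
      have hmax : ∀ y ∈ Af, y ≤ x := by
        intro y hy
        exact pv_head_ge x t hcp y (hc ▸ (hmem y).mp hy)
      have hr : Af.foldl max (-1) = x := by
        have h3 := (PySem.List.le_foldl_max Af (-1)).2 x hx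
        rcases PySem.List.foldl_max_mem Af (-1) with h1 | h1
        · omega
        · have h2 := hmax _ h1
          omega
      rw [hr, if_neg (by omega)]

-- ===== VERDICT =====
theorem maximizeSquareArea_spec : Claim_equal_maximizeSquareArea := by
  intro m n hF vF _
  exact pv_main m n hF vF
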